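-- pv_equiv track=rewrite | github.com/RakaAdmiharfan/automated-sdr-superthon | website_sdr/polls/views.py | check_keywords_with_openai
-- ===== SOURCE A (Python) =====
-- def check_keywords_with_openai(text, keywords):
--     summary = []
--     lines = text.splitlines()
--     for keyword in keywords:
--         found = False
--         for i, line in enumerate(lines):
--             if keyword.lower() in line.lower():
--                 summary.append(f"Application: Pass - '{keyword}' found on line {i+1}: {line.strip()}")
--                 found = True
--                 break
--         if not found:
--             summary.append(f"Application: Fail - '{keyword}' not found")
--     return "\n".join(summary)
-- ===== SOURCE B (Python) =====
-- def check_keywords_with_openai(text, keywords):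
--     # One pass over the lines: lowercase each line once and record, per lowered
--     # keyword, the first (line number, stripped line) where it occurs; then emit
--     # messages by a lookup pass over the original keywords.
--     keys = [k.lower() for k in keywords]
--     first = {}
--     for i, line in enumerate(text.splitlines()):
--         low = line.lower()
--         for k in keys:
--             if k not in first and k in low:
--                 first[k] = (i + 1, line.strip())
--     out = []
--     for kw in keywords:
--         hit = first.get(kw.lower())
--         if hit is not None:
--             out.append(f"Application: Pass - '{kw}' found on line {hit[0]}: {hit[1]}")
--         else:
--             out.append(f"Application: Fail - '{kw}' not found")
--     return "\n".join(out)
-- ===== Notes on version B (the rewrite author's own statement) =====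
-- stated objective: alternative
-- what changed: Inverts the nested loops: one pass over the lines (lowercasing each line once) builds a dict from each lowered keyword to its first (line number, stripped line), then a second pass over the keywords emits the messages by dict lookup, instead of rescanning all lines per keyword.
import Mathlib
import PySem

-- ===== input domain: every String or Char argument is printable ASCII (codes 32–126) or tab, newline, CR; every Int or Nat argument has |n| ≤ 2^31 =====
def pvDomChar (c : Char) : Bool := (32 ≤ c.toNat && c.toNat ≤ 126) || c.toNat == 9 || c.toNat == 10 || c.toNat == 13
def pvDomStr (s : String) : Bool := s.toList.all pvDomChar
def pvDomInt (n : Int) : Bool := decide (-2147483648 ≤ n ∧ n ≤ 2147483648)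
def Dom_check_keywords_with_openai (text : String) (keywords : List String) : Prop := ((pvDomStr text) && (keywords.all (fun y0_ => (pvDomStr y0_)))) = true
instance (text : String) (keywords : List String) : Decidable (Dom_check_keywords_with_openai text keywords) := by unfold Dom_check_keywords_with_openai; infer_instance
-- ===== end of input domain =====

-- B replaces A's per-keyword rescans of all lines by one pass over the lines that
-- builds a dict from each lowered keyword to its first match, then a lookup pass
-- over the keywords (objective: alternative decomposition).

-- ===== PORT A =====
-- the inner 'for i, line in enumerate(lines): … break' with its found flag,
-- returning the first matching (i, line) if any
def pvAFind (keyword : String) : List (Int × String) → Option (Int × String)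
  | [] => none
  | (i, line) :: rest =>
    if PySem.Str.isIn (PySem.Str.lower keyword) (PySem.Str.lower line) then some (i, line)
    else pvAFind keyword rest

def check_keywords_with_openai (text : String) (keywords : List String) : String :=
  let lines := PySem.Str.splitlines text
  let summary := keywords.foldl (fun summary keyword =>
    match pvAFind keyword (PySem.List.enumerate lines 0) with
    | some (i, line) =>
        summary ++ ["Application: Pass - '" ++ keyword ++ "' found on line " ++
                    PySem.Int.toStr (i + 1) ++ ": " ++ PySem.Str.strip line]
    | none => summary ++ ["Application: Fail - '" ++ keyword ++ "' not found"]) []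
  PySem.Str.join "\n" summary

-- ===== PORT B =====
-- the body of B's inner 'for k in keys' loop: record the first match per key
def pvStep (low : String) (v : Int × String)
    (d : PySem.Dict String (Int × String)) (k : String) :
    PySem.Dict String (Int × String) :=
  if !(d.contains k) && PySem.Str.isIn k low then d.insert k v else d

def check_keywords_with_openai_alt (text : String) (keywords : List String) : String :=
  let keys := keywords.map PySem.Str.lower
  let first := (PySem.List.enumerate (PySem.Str.splitlines text) 0).foldl
    (fun d (p : Int × String) =>
      keys.foldl (pvStep (PySem.Str.lower p.2) (p.1 + 1, PySem.Str.strip p.2)) d)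
    PySem.Dict.empty
  let out := keywords.map (fun kw =>
    match first.get? (PySem.Str.lower kw) with
    | some hit => "Application: Pass - '" ++ kw ++ "' found on line " ++
                  PySem.Int.toStr hit.1 ++ ": " ++ hit.2
    | none => "Application: Fail - '" ++ kw ++ "' not found")
  PySem.Str.join "\n" out

-- ===== PRECONDITION & SPEC =====
def Spec_check_keywords_with_openai (text : String) (keywords : List String) (out : String) : Prop := out = check_keywords_with_openai_alt text keywords
instance (text : String) (keywords : List String) (out : String) : Decidable (Spec_check_keywords_with_openai text keywords out) := by unfold Spec_check_keywords_with_openai; infer_instance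

-- ===== CLAIM (what is proved, stated in full; the proofs are below) =====
def Claim_equal_check_keywords_with_openai : Prop := ∀ (text : String) (keywords : List String), Dom_check_keywords_with_openai text keywords → Spec_check_keywords_with_openai text keywords (check_keywords_with_openai text keywords)

-- ===== LEMMAS AND PROOFS =====

lemma pvStep_get?_not_mem (low : String) (v : Int × String) (k : String) :
    ∀ (keys : List String) (d : PySem.Dict String (Int × String)), k ∉ keys →
      (keys.foldl (pvStep low v) d).get? k = d.get? k := by
  intro keys
  induction keys with
  | nil => intro d _; rfl
  | cons k' ks ih =>
    intro d hk
    simp only [List.mem_cons, not_or] at hk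
    simp only [List.foldl_cons, ih _ hk.2, pvStep]
    split
    · exact PySem.Dict.get?_insert_of_ne _ _ hk.1
    · rfl

lemma pvStep_get?_mem (low : String) (v : Int × String) (k : String) :
    ∀ (keys : List String) (d : PySem.Dict String (Int × String)), k ∈ keys →
      (keys.foldl (pvStep low v) d).get? k =
        ((d.get? k).orElse (fun _ => if PySem.Str.isIn k low then some v else none)) := by
  intro keys
  induction keys with
  | nil => intro d hk; cases hk
  | cons k' ks ih =>
    intro d hk
    by_cases hmem : k ∈ ks
    · simp only [List.foldl_cons, ih _ hmem]
      by_cases hkk : k' = k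
      · rw [hkk]
        unfold pvStep
        split
        · rename_i hcond
          simp only [Bool.and_eq_true, Bool.not_eq_true'] at hcond
          rw [PySem.Dict.get?_insert_self]
          rw [PySem.Dict.contains_eq_isSome_get?] at hcond
          have h2 : PySem.Chars.isIn k.toList low.toList = true := by simpa using hcond.2
          cases hget : d.get? k with
          | some w => rw [hget] at hcond; simp at hcond
          | none => simp [h2, Option.orElse]
        · rfl
      · unfold pvStep
        split
        · rw [PySem.Dict.get?_insert_of_ne _ _ fun h => hkk h.symm]
        · rfl
    · have hkk : k = k' := by
        rcases List.mem_cons.mp hk with h | h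
        · exact h
        · exact absurd h hmem
      subst hkk
      simp only [List.foldl_cons, pvStep_get?_not_mem low v k ks _ hmem]
      unfold pvStep
      split
      · rename_i hcond
        simp only [Bool.and_eq_true, Bool.not_eq_true'] at hcond
        rw [PySem.Dict.get?_insert_self]
        rw [PySem.Dict.contains_eq_isSome_get?] at hcond
        have h2 : PySem.Chars.isIn k.toList low.toList = true := by simpa using hcond.2
        cases hget : d.get? k with
        | some w => rw [hget] at hcond; simp at hcond
        | none => simp [h2, Option.orElse]
      · rename_i hcond
        simp only [Bool.and_eq_true, Bool.not_eq_true', not_and] at hcond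
        cases hget : d.get? k with
        | some w => simp [Option.orElse]
        | none =>
          rw [PySem.Dict.contains_eq_isSome_get?, hget] at hcond
          simp at hcond
          have h2 : PySem.Chars.isIn k.toList low.toList = false := by
            simpa using hcond
          simp [h2, Option.orElse]

-- B's line pass: the dict entry for a key that is in the key list is exactly
-- A's first matching line, rendered as (index + 1, stripped line)
lemma pvDict_get? (keys : List String) (kw : String)
    (hk : PySem.Str.lower kw ∈ keys) :
    ∀ (l : List (Int × String)) (d : PySem.Dict String (Int × String)),
      (l.foldl (fun d (p : Int × String) =>
          keys.foldl (pvStep (PySem.Str.lower p.2) (p.1 + 1, PySem.Str.strip p.2)) d) d).get?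
        (PySem.Str.lower kw) =
      ((d.get? (PySem.Str.lower kw)).orElse
        (fun _ => (pvAFind kw l).map (fun p => (p.1 + 1, PySem.Str.strip p.2)))) := by
  intro l
  induction l with
  | nil => intro d; cases hget : d.get? (PySem.Str.lower kw) <;> simp [pvAFind, Option.orElse, hget]
  | cons p rest ih =>
    intro d
    simp only [List.foldl_cons, ih,
      pvStep_get?_mem (PySem.Str.lower p.2) (p.1 + 1, PySem.Str.strip p.2) _ keys d hk]
    obtain ⟨i, line⟩ := p
    simp only [pvAFind]
    cases hget : d.get? (PySem.Str.lower kw) with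
    | some w => simp [Option.orElse]
    | none =>
      by_cases hm :
          PySem.Chars.isIn (PySem.Chars.lower kw.toList) (PySem.Chars.lower line.toList) = true
      · simp [hm, Option.orElse, PySem.Str.isIn, PySem.Str.lower]
      · simp only [Bool.not_eq_true] at hm
        simp [hm, Option.orElse, PySem.Str.isIn, PySem.Str.lower]

-- ===== VERDICT (by name: the statement is the Claim_ definition above) =====
theorem check_keywords_with_openai_spec : Claim_equal_check_keywords_with_openai := by
  intro text keywords _
  unfold Spec_check_keywords_with_openai
  unfold check_keywords_with_openai check_keywords_with_openai_alt
  simp only []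
  congr 1
  -- A's appending foldl is the map of the per-keyword message
  rw [show (fun (summary : List String) (keyword : String) =>
      match pvAFind keyword (PySem.List.enumerate (PySem.Str.splitlines text) 0) with
      | some (i, line) =>
          summary ++ ["Application: Pass - '" ++ keyword ++ "' found on line " ++
                      PySem.Int.toStr (i + 1) ++ ": " ++ PySem.Str.strip line]
      | none => summary ++ ["Application: Fail - '" ++ keyword ++ "' not found"]) =
    (fun summary keyword => summary ++
      [match pvAFind keyword (PySem.List.enumerate (PySem.Str.splitlines text) 0) with
       | some (i, line) =>
          "Application: Pass - '" ++ keyword ++ "' found on line " ++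
          PySem.Int.toStr (i + 1) ++ ": " ++ PySem.Str.strip line
       | none => "Application: Fail - '" ++ keyword ++ "' not found"])
    from by
      funext summary keyword
      cases pvAFind keyword (PySem.List.enumerate (PySem.Str.splitlines text) 0) with
      | some p => obtain ⟨i, line⟩ := p; rfl
      | none => rfl]
  rw [PySem.List.foldl_append_singleton_eq_map]
  apply List.map_congr_left
  intro kw hkw
  have hk : PySem.Str.lower kw ∈ keywords.map PySem.Str.lower := List.mem_map_of_mem hkw
  rw [pvDict_get? (keywords.map PySem.Str.lower) kw hk
      (PySem.List.enumerate (PySem.Str.splitlines text) 0) PySem.Dict.empty]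
  rw [PySem.Dict.get?_empty]
  cases hfind : pvAFind kw (PySem.List.enumerate (PySem.Str.splitlines text) 0) with
  | some p => obtain ⟨i, line⟩ := p; simp [Option.orElse]
  | none => simp [Option.orElse]
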